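-- pv_equiv track=rewrite | github.com/Skrjunior/Phython | Cvicenia/matica_riedka.py | vloz
-- ===== SOURCE A (Python) =====
-- def vloz(m,rm,roz):
--     m=[]
--     for i in range(roz):
--             temp=[]
--             for j in range(roz):
--                 x=rm.get((i,j),0)
--                 temp.append(x)
--             m.append(temp)
--     return m
-- ===== SOURCE B (Python) =====
-- def vloz(m, rm, roz):
--     grid = [[0] * roz for _ in range(roz)]
--     for (i, j), v in rm.items():
--         if 0 <= i < roz and 0 <= j < roz:
--             grid[i][j] = v
--     return grid
-- ===== Notes on version B (the rewrite author's own statement) =====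
-- stated objective: alternative
-- what changed: Instead of scanning every cell of the roz x roz grid and doing a dict lookup per cell, B pre-builds a zero grid and scatters only the sparse dict's in-range entries into it.
import Mathlib
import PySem

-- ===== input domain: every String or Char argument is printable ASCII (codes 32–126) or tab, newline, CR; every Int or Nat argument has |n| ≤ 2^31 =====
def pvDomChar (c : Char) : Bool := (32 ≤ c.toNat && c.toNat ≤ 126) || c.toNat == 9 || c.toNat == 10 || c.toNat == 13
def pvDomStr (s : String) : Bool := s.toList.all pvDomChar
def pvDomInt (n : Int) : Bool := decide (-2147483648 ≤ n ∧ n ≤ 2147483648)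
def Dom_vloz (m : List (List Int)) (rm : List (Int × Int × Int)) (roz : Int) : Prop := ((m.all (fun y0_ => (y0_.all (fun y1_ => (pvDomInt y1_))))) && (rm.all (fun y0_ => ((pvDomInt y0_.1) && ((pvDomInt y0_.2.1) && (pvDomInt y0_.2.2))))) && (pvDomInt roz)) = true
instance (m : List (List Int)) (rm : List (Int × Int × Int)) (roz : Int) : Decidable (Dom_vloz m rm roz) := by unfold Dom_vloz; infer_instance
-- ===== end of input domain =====

-- B replaces A's per-cell dict lookup over the whole roz x roz grid by a zero grid
-- plus a scatter of the sparse dict's in-range entries (objective: alternative).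


-- ===== PORT A =====
-- rm.get((i, j), 0): first match in the association list, default 0
def rmGetD (rm : List (Int × Int × Int)) (i j : Int) : Int :=
  ((rm.find? (fun t => t.1 == i && t.2.1 == j)).map (·.2.2)).getD 0

def vloz (m : List (List Int)) (rm : List (Int × Int × Int)) (roz : Int) : List (List Int) :=
  (PySem.List.pyRange 0 roz 1).foldl (fun mm i =>
    mm ++ [(PySem.List.pyRange 0 roz 1).foldl (fun temp j => temp ++ [rmGetD rm i j]) []]) []

-- ===== PORT B =====
-- loop body of Source B: write one in-range sparse entry into the grid
def scatterStep (roz : Int) (g : List (List Int)) (t : Int × Int × Int) : List (List Int) :=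
  if 0 ≤ t.1 ∧ t.1 < roz ∧ 0 ≤ t.2.1 ∧ t.2.1 < roz then
    g.modify t.1.toNat (fun row => row.set t.2.1.toNat t.2.2)
  else g

def vloz_alt (m : List (List Int)) (rm : List (Int × Int × Int)) (roz : Int) : List (List Int) :=
  rm.foldl (scatterStep roz) (List.replicate roz.toNat (List.replicate roz.toNat 0))

-- ===== PRECONDITION & SPEC =====
-- Pre_ requires the keys (i, j) of the association list rm to be pairwise distinct — the
-- faithful image of a Python dict, whose keys are always unique; on duplicate-key lists
-- first-match (A) versus last-write (B) is an accident of the encoding, not of the programs.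
def Pre_vloz (m : List (List Int)) (rm : List (Int × Int × Int)) (roz : Int) : Prop :=
  (rm.map (fun t => (t.1, t.2.1))).Nodup
instance (m : List (List Int)) (rm : List (Int × Int × Int)) (roz : Int) : Decidable (Pre_vloz m rm roz) := by unfold Pre_vloz; infer_instance

def pvWitness_vloz : List (List Int) × (List (Int × Int × Int)) × Int := ([], [(0, 0, 5), (1, 1, -2)], 2)

def Spec_vloz (m : List (List Int)) (rm : List (Int × Int × Int)) (roz : Int) (out : List (List Int)) : Prop := out = vloz_alt m rm roz
instance (m : List (List Int)) (rm : List (Int × Int × Int)) (roz : Int) (out : List (List Int)) : Decidable (Spec_vloz m rm roz out) := by unfold Spec_vloz; infer_instance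

-- ===== CLAIM (what is proved, stated in full; the proofs are below) =====
def Claim_equal_vloz : Prop := ∀ (m : List (List Int)) (rm : List (Int × Int × Int)) (roz : Int), Dom_vloz m rm roz → Pre_vloz m rm roz → Spec_vloz m rm roz (vloz m rm roz)

-- ===== LEMMAS AND PROOFS =====

theorem foldl_push {α β : Type} (f : α → β) (l : List α) (acc : List β) :
    l.foldl (fun a x => a ++ [f x]) acc = acc ++ l.map f := by
  induction l generalizing acc with
  | nil => simp
  | cons x xs ih => simp [List.foldl_cons, ih]

theorem scatterStep_length (roz : Int) (g : List (List Int)) (t : Int × Int × Int) :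
    (scatterStep roz g t).length = g.length := by
  unfold scatterStep; split <;> simp

theorem scatterStep_rows (roz : Int) (n : Nat) (g : List (List Int)) (t : Int × Int × Int)
    (hg : ∀ row ∈ g, row.length = n) :
    ∀ row ∈ scatterStep roz g t, row.length = n := by
  intro row hrow
  unfold scatterStep at hrow
  split at hrow
  · rw [List.mem_iff_getElem] at hrow
    obtain ⟨k, hk, rfl⟩ := hrow
    rw [List.getElem_modify]
    split
    · simp [hg _ (List.getElem_mem _)]
    · exact hg _ (List.getElem_mem _)
  · exact hg row hrow

theorem scatter_length (roz : Int) (rm : List (Int × Int × Int)) (g : List (List Int)) :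
    (rm.foldl (scatterStep roz) g).length = g.length := by
  induction rm generalizing g with
  | nil => rfl
  | cons t rest ih => simp only [List.foldl_cons, ih, scatterStep_length]

theorem scatter_rows (roz : Int) (n : Nat) (rm : List (Int × Int × Int)) (g : List (List Int))
    (hg : ∀ row ∈ g, row.length = n) :
    ∀ row ∈ rm.foldl (scatterStep roz) g, row.length = n := by
  induction rm generalizing g with
  | nil => exact hg
  | cons t rest ih =>
      simp only [List.foldl_cons]
      exact ih _ (scatterStep_rows roz n g t hg)

-- cell characterisation of the scatter loop on nodup-key lists
theorem scatter_cell (roz : Int) (rm : List (Int × Int × Int)) (g : List (List Int))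
    (hnd : (rm.map (fun t => (t.1, t.2.1))).Nodup)
    (hlen : g.length = roz.toNat) (hrows : ∀ row ∈ g, row.length = roz.toNat)
    (a b : Nat) (ha : a < roz.toNat) (hb : b < roz.toNat) :
    ((rm.foldl (scatterStep roz) g).getD a []).getD b 0 =
      match rm.find? (fun t => t.1 == (a : Int) && t.2.1 == (b : Int)) with
      | some t => t.2.2
      | none => (g.getD a []).getD b 0 := by
  induction rm generalizing g with
  | nil => rfl
  | cons t rest ih =>
      simp only [List.map_cons, List.nodup_cons] at hnd
      obtain ⟨hkey, hnd'⟩ := hnd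
      simp only [List.foldl_cons]
      by_cases hp : (t.1 == (a : Int) && t.2.1 == (b : Int)) = true
      · -- the head entry is exactly cell (a, b); it is written, and no later entry touches it
        obtain ⟨hta, htb⟩ : t.1 = (a : Int) ∧ t.2.1 = (b : Int) := by
          have := hp; simp only [Bool.and_eq_true, beq_iff_eq] at this; exact this
        have hstep : scatterStep roz g t = g.modify t.1.toNat (fun row => row.set t.2.1.toNat t.2.2) := by
          unfold scatterStep; rw [if_pos]; exact ⟨by omega, by omega, by omega, by omega⟩
        have hnone : rest.find? (fun s => s.1 == (a : Int) && s.2.1 == (b : Int)) = none := by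
          rw [List.find?_eq_none]
          intro s hs hps
          simp only [Bool.and_eq_true, beq_iff_eq] at hps
          exact hkey (List.mem_map.mpr ⟨s, hs, by rw [hps.1, hps.2, ← hta, ← htb]⟩)
        rw [List.find?_cons_of_pos (p := fun s => s.1 == (a : Int) && s.2.1 == (b : Int)) (l := rest) hp,
            ih (scatterStep roz g t) hnd' (by rw [scatterStep_length, hlen])
              (scatterStep_rows roz _ g t hrows), hnone]
        have hga : a < g.length := by omega
        rw [hstep]
        have h1 : (g.modify t.1.toNat (fun row => row.set t.2.1.toNat t.2.2)).getD a []
            = g[a].set t.2.1.toNat t.2.2 := by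
          rw [show t.1.toNat = a from by omega, List.getD_eq_getElem?_getD,
            List.getElem?_modify, List.getElem?_eq_getElem hga]
          simp
        rw [h1, List.getD_eq_getElem _ _
            (by rw [List.length_set, hrows _ (List.getElem_mem hga)]; exact hb),
          show t.2.1.toNat = b from by omega, List.getElem_set_self]
      · -- head entry is some other cell: the write (if any) does not touch (a, b)
        have hcell : ((scatterStep roz g t).getD a []).getD b 0 = (g.getD a []).getD b 0 := by
          unfold scatterStep
          split
          · rename_i hin
            by_cases hia : t.1.toNat = a
            · have hta : t.1 = (a : Int) := by omega
              have hjb : t.2.1.toNat ≠ b := by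
                have : t.2.1 ≠ (b : Int) := by
                  intro h; exact hp (by simp [hta, h])
                omega
              cases hga : g[a]? with
              | none => simp [List.getD_eq_getElem?_getD, List.getElem?_modify, hga]
              | some row =>
                  simp [List.getD_eq_getElem?_getD, List.getElem?_modify, hga, hia,
                    List.getElem?_set_ne hjb]
            · simp [List.getD_eq_getElem?_getD, List.getElem?_modify, hia]
          · rfl
        rw [List.find?_cons_of_neg (p := fun s => s.1 == (a : Int) && s.2.1 == (b : Int)) (l := rest) hp,
            ih (scatterStep roz g t) hnd' (by rw [scatterStep_length, hlen])
              (scatterStep_rows roz _ g t hrows)]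
        cases hf : rest.find? (fun s => s.1 == (a : Int) && s.2.1 == (b : Int)) with
        | none => simpa only [hf] using hcell
        | some s => simp only [hf]

-- ===== VERDICT (by name: the statement is the Claim_ definition above) =====
theorem vloz_spec : Claim_equal_vloz := by
  intro m rm roz _ hpre
  unfold Pre_vloz at hpre
  unfold Spec_vloz vloz vloz_alt
  simp only [foldl_push, List.nil_append]
  rw [PySem.List.pyRange_one]
  have hnz : roz - 0 = roz := by omega
  rw [hnz]
  have hg0len : (List.replicate roz.toNat (List.replicate roz.toNat (0 : Int))).length = roz.toNat := by simp
  have hg0rows : ∀ row ∈ List.replicate roz.toNat (List.replicate roz.toNat (0 : Int)), row.length = roz.toNat := by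
    intro row hrow; rw [List.eq_of_mem_replicate hrow]; simp
  apply List.ext_getElem
  · simp [scatter_length]
  · intro a h1 h2
    have ha : a < roz.toNat := by simpa using h1
    simp only [List.getElem_map, List.getElem_range]
    have hrowmem := List.getElem_mem h2
    have hrowlen := scatter_rows roz roz.toNat rm _ hg0rows _ hrowmem
    apply List.ext_getElem
    · simp [hrowlen]
    · intro b hb1 hb2
      have hb : b < roz.toNat := by simpa using hb1
      simp only [List.getElem_map, List.getElem_range]
      have := scatter_cell roz rm _ hpre hg0len hg0rows a b ha hb
      have hlenF : a < (rm.foldl (scatterStep roz) (List.replicate roz.toNat (List.replicate roz.toNat (0 : Int)))).length := by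
        rw [scatter_length, hg0len]; exact ha
      rw [List.getD_eq_getElem _ _ hlenF, List.getD_eq_getElem _ _ hb2] at this
      rw [this]
      have hg0cell : ((List.replicate roz.toNat (List.replicate roz.toNat (0 : Int))).getD a []).getD b 0 = 0 := by
        have hr : (List.replicate roz.toNat (List.replicate roz.toNat (0 : Int))).getD a []
            = List.replicate roz.toNat (0 : Int) := by
          rw [List.getD_eq_getElem _ _ (by simpa using ha)]; simp
        rw [hr, List.getD_eq_getElem _ _ (by simpa using hb)]; simp
      unfold rmGetD
      simp only [zero_add]
      cases hf : rm.find? (fun t => t.1 == (a : Int) && t.2.1 == (b : Int)) with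
      | none => simp only [hf, Option.map_none, Option.getD_none]; exact hg0cell.symm
      | some s => simp only [hf, Option.map_some, Option.getD_some]
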